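-- pv_equiv track=rewrite | github.com/chosaihim/jungle_codingTest_study | FEB/9th/용-ballon.py | solution
-- ===== SOURCE A (Python) =====
-- import heapq
--
-- def solution(a):
--     answer = 2
--     left_heap = []
--     right_heap = []
--
--     #
--     big_count = [0]*(len(a)+1)
--     heapq.heappush(left_heap, a[0])
--
--     # 기준 풍선
--     for i in range(1,len(a)-1):
--         if left_heap[0] > a[i]:
--             big_count[i] += 1
--         heapq.heappush(left_heap,a[i])
--
--     heapq.heappush(right_heap, a[-1])
--     for j in range(len(a)-2,0,-1):
--         if big_count[j] >= 1:
--             answer += 1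
--         elif right_heap[0] > a[j]:
--                 answer += 1
--         heapq.heappush(right_heap, a[j])
--
--
--     return answer
-- ===== SOURCE B (Python) =====
-- def solution(a):
--     n = len(a)
--     answer = 2
--     # prefix_min[i] = min of a[:i]; suffix_min[i] = min of a[i+1:]
--     prefix_min = [0] * n
--     m = a[0]
--     for i in range(1, n):
--         prefix_min[i] = m
--         if a[i] < m:
--             m = a[i]
--     suffix_min = [0] * n
--     m = a[n - 1]
--     for i in range(n - 2, -1, -1):
--         suffix_min[i] = m
--         if a[i] < m:
--             m = a[i]
--     for i in range(1, n - 1):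
--         if a[i] < prefix_min[i] or a[i] < suffix_min[i]:
--             answer += 1
--     return answer
-- ===== Notes on version B (the rewrite author's own statement) =====
-- stated objective: alternative
-- what changed: Replaces A's two incremental heaps (heappush per element, reading heap[0] as the running min) with explicit prefix-min and suffix-min arrays built in two linear passes plus one combine pass over the interior indices.
import Mathlib
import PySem

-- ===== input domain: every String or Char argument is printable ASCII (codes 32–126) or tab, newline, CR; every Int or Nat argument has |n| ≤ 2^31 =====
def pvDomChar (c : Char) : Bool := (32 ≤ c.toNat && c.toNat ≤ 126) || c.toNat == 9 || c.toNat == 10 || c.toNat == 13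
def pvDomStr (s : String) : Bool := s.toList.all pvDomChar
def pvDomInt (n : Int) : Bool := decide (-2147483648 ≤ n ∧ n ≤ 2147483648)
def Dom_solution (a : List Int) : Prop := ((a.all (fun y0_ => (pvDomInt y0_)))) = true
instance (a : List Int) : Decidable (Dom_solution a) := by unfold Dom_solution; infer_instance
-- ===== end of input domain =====

-- B replaces A's two heaps by prefix-min/suffix-min arrays and one combine pass (equal return value on every non-empty list).

-- ===== PORT A =====
-- heapq._siftdown(heap, 0, pos) exactly as in CPython's heapq (item already placed at pos)
def siftup (h : List Int) (pos : Nat) (item : Int) : List Int :=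
  if _hpos : 0 < pos then
    if item < h.getD ((pos - 1) / 2) 0 then
      siftup (h.set pos (h.getD ((pos - 1) / 2) 0)) ((pos - 1) / 2) item
    else h.set pos item
  else h.set pos item
  termination_by pos
  decreasing_by omega

-- heapq.heappush: append, then sift up from the last slot
def heappush (h : List Int) (item : Int) : List Int :=
  siftup (h ++ [item]) h.length item

-- body of A's first loop: state (left_heap, big_count)
def stepL (a : List Int) (s : List Int × List Int) (i : Int) : List Int × List Int :=
  (heappush s.1 (PySem.List.pyGetD a i 0),
   if PySem.List.pyGetD s.1 0 0 > PySem.List.pyGetD a i 0 then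
     PySem.List.pySetD s.2 i (PySem.List.pyGetD s.2 i 0 + 1)
   else s.2)

-- body of A's second loop: state (answer, right_heap); big_count fixed
def stepR (a : List Int) (bc : List Int) (s : Int × List Int) (j : Int) : Int × List Int :=
  (if PySem.List.pyGetD bc j 0 ≥ 1 then s.1 + 1
   else if PySem.List.pyGetD s.2 0 0 > PySem.List.pyGetD a j 0 then s.1 + 1
   else s.1,
   heappush s.2 (PySem.List.pyGetD a j 0))

def solution (a : List Int) : Int :=
  -- indexing the first/last element raises IndexError on the empty list, which Pre_solution excludes
  let s1 := (PySem.List.pyRange 1 ((a.length : Int) - 1) 1).foldl (stepL a)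
              (heappush [] (PySem.List.pyGetD a 0 0), List.replicate (a.length + 1) 0)
  let s2 := (PySem.List.pyRange ((a.length : Int) - 2) 0 (-1)).foldl (stepR a s1.2)
              (2, heappush [] (PySem.List.pyGetD a (-1) 0))
  s2.1

-- ===== PORT B =====
-- body of B's two min-array passes: state (array, running min m); writes m at i, then lowers m
def stepP (a : List Int) (s : List Int × Int) (i : Int) : List Int × Int :=
  (PySem.List.pySetD s.1 i s.2,
   if PySem.List.pyGetD a i 0 < s.2 then PySem.List.pyGetD a i 0 else s.2)

-- body of B's combine pass
def stepC (a pm sm : List Int) (ans : Int) (i : Int) : Int :=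
  if PySem.List.pyGetD a i 0 < PySem.List.pyGetD pm i 0 ∨
     PySem.List.pyGetD a i 0 < PySem.List.pyGetD sm i 0 then ans + 1
  else ans

def solution_alt (a : List Int) : Int :=
  let n : Int := a.length
  let p := (PySem.List.pyRange 1 n 1).foldl (stepP a)
             (List.replicate a.length 0, PySem.List.pyGetD a 0 0)
  let q := (PySem.List.pyRange (n - 2) (-1) (-1)).foldl (stepP a)
             (List.replicate a.length 0, PySem.List.pyGetD a (n - 1) 0)
  (PySem.List.pyRange 1 (n - 1) 1).foldl (stepC a p.1 q.1) 2

-- ===== PRECONDITION & SPEC =====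
-- A indexes the first and last elements unconditionally, so it raises IndexError exactly on the empty list.
def Pre_solution (a : List Int) : Prop := a ≠ []
instance (a : List Int) : Decidable (Pre_solution a) := by unfold Pre_solution; infer_instance
def pvWitness_solution : List Int := [5, 1, 4]

def Spec_solution (a : List Int) (out : Int) : Prop := out = solution_alt a
instance (a : List Int) (out : Int) : Decidable (Spec_solution a out) := by unfold Spec_solution; infer_instance

-- ===== CLAIM (what is proved, stated in full; the proofs are below) =====
def Claim_equal_solution : Prop := ∀ (a : List Int), Dom_solution a → Pre_solution a → Spec_solution a (solution a)

-- ===== LEMMAS AND PROOFS =====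

-- mTo a i = min of a[0..i]; sTo a k = min of the last k+1 elements of a
def mTo (a : List Int) : Nat → Int
  | 0 => a.getD 0 0
  | i + 1 => min (mTo a i) (a.getD (i + 1) 0)

def sTo (a : List Int) : Nat → Int
  | 0 => a.getD (a.length - 1) 0
  | k + 1 => min (sTo a k) (a.getD (a.length - 2 - k) 0)

-- contribution of interior index j, and the running total for j = 1..j0
def incr (a : List Int) (j : Nat) : Int :=
  if a.getD j 0 < mTo a (j - 1) ∨ a.getD j 0 < sTo a (a.length - 2 - j) then 1 else 0

def cntTo (a : List Int) : Nat → Int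
  | 0 => 0
  | j + 1 => incr a (j + 1) + cntTo a j

-- "h is a nonempty heap whose slot 0 holds m, a lower bound of all entries"
def HeapGood (h : List Int) (m : Int) : Prop :=
  h ≠ [] ∧ h.getD 0 0 = m ∧ ∀ y ∈ h, m ≤ y

lemma getD_set_eq (l : List Int) (i j : Nat) (v : Int) :
    (l.set i v).getD j 0 = if j = i ∧ i < l.length then v else l.getD j 0 := by
  simp [List.getD_eq_getElem?_getD, List.getElem?_set]
  split_ifs with h1 h2 h3 h4 <;> simp_all

lemma siftup_length (h : List Int) (pos : Nat) (x : Int) :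
    (siftup h pos x).length = h.length := by
  fun_induction siftup <;> simp_all

lemma siftup_mem (h : List Int) (pos : Nat) (x : Int) (hp : pos < h.length) :
    ∀ y ∈ siftup h pos x, y = x ∨ y ∈ h := by
  fun_induction siftup with
  | case1 h pos hpos hlt ih =>
    intro y hy
    have hp2 : (pos - 1) / 2 < h.length := by omega
    rcases ih (by simp only [List.length_set]; omega) y hy with h1 | h2
    · exact Or.inl h1
    · rcases List.mem_or_eq_of_mem_set h2 with h3 | h4
      · exact Or.inr h3
      · subst h4
        right
        have e : h.getD ((pos - 1) / 2) 0 = h[(pos - 1) / 2] := by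
          simp [List.getD_eq_getElem?_getD, List.getElem?_eq_getElem hp2]
        rw [e]
        exact List.getElem_mem hp2
  | case2 h pos hpos hnlt =>
    intro y hy
    rcases List.mem_or_eq_of_mem_set hy with h3 | h4
    · exact Or.inr h3
    · exact Or.inl h4
  | case3 h pos hpos =>
    intro y hy
    rcases List.mem_or_eq_of_mem_set hy with h3 | h4
    · exact Or.inr h3
    · exact Or.inl h4

lemma siftup_head_small (h : List Int) (pos : Nat) (x : Int) (hp : pos < h.length)
    (H : ∀ j, j < h.length → j ≠ pos → x < h.getD j 0) :
    (siftup h pos x).getD 0 0 = x := by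
  fun_induction siftup with
  | case1 h pos hpos hlt ih =>
    apply ih
    · simp only [List.length_set]; omega
    · intro j hj hjne
      simp only [List.length_set] at hj
      rw [getD_set_eq]
      split_ifs with hc
      · exact hlt
      · refine H j hj ?_
        intro hje; subst hje
        simp at hc
        omega
  | case2 h pos hpos hnlt =>
    rw [getD_set_eq]
    split_ifs with hc
    · rcases hc with ⟨h1, _⟩; omega
    · exfalso
      have := H ((pos - 1) / 2) (by omega) (by omega)
      omega
  | case3 h pos hpos =>
    rw [getD_set_eq]
    simp only [Nat.eq_zero_of_not_pos hpos] at *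
    simp [hp]

lemma siftup_head_stay (h : List Int) (pos : Nat) (x : Int) (h0 : 0 < pos)
    (hle : h.getD 0 0 ≤ x) :
    (siftup h pos x).getD 0 0 = h.getD 0 0 := by
  fun_induction siftup with
  | case1 h pos hpos hlt ih =>
    have hpar : (pos - 1) / 2 ≠ 0 := by
      intro hz
      rw [hz] at hlt
      omega
    have hset0 : (h.set pos (h.getD ((pos - 1) / 2) 0)).getD 0 0 = h.getD 0 0 := by
      rw [getD_set_eq]; split_ifs with hc <;> simp_all
    rw [ih (by omega) (by rw [hset0]; exact hle), hset0]
  | case2 h pos hpos hnlt =>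
    rw [getD_set_eq]; split_ifs with hc
    · rcases hc with ⟨h1, _⟩; omega
    · rfl
  | case3 h pos hpos => omega

lemma heappush_nil (x : Int) : heappush [] x = [x] := by
  unfold heappush
  rw [siftup]
  simp

lemma getD_mem_self (h : List Int) (j : Nat) (hj : j < h.length) : h.getD j 0 ∈ h := by
  have e : h.getD j 0 = h[j] := by
    simp [List.getD_eq_getElem?_getD, List.getElem?_eq_getElem hj]
  rw [e]
  exact List.getElem_mem hj

lemma getD_append_left (h t : List Int) (j : Nat) (hj : j < h.length) :
    (h ++ t).getD j 0 = h.getD j 0 := by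
  simp [List.getD_eq_getElem?_getD, List.getElem?_append_left hj]

lemma heappush_ne_nil (h : List Int) (x : Int) : heappush h x ≠ [] := by
  have hl : (heappush h x).length = h.length + 1 := by
    unfold heappush
    rw [siftup_length]
    simp
  intro he
  rw [he] at hl
  simp at hl

lemma heappush_good (h : List Int) (m x : Int) (hg : HeapGood h m) :
    HeapGood (heappush h x) (min m x) := by
  obtain ⟨hne, hhead, hlb⟩ := hg
  have hlen0 : 0 < h.length := List.length_pos_iff.mpr hne
  have hposlt : h.length < (h ++ [x]).length := by simp
  refine ⟨heappush_ne_nil h x, ?_, ?_⟩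
  · unfold heappush
    rcases lt_or_ge x m with hxm | hmx
    · rw [siftup_head_small _ _ _ hposlt]
      · omega
      · intro j hj hjne
        have hjlt : j < h.length := by simp at hj; omega
        rw [getD_append_left _ _ _ hjlt]
        have := hlb _ (getD_mem_self h j hjlt)
        omega
    · rw [siftup_head_stay _ _ _ hlen0]
      · rw [getD_append_left _ _ _ hlen0, hhead]; omega
      · rw [getD_append_left _ _ _ hlen0, hhead]; omega
  · intro y hy
    rcases siftup_mem _ _ _ hposlt y hy with h1 | h2
    · rw [h1]; exact min_le_right m x
    · rcases List.mem_append.mp h2 with h3 | h4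
      · exact le_trans (min_le_left m x) (hlb _ h3)
      · simp at h4; rw [h4]; exact min_le_right m x

lemma getD_replicate (k j : Nat) : (List.replicate k (0 : Int)).getD j 0 = 0 := by
  simp [List.getD_eq_getElem?_getD, List.getElem?_replicate]
  split_ifs <;> simp

lemma heapGood_singleton (v : Int) : HeapGood [v] v := by
  refine ⟨by simp, by simp, by simp⟩

lemma if_lt_min (x c : Int) : (if x < c then x else c) = min c x := by
  rw [min_def]; split_ifs <;> omega

lemma mTo_succ (a : List Int) (m : Nat) (hm : 1 ≤ m) :
    mTo a m = min (mTo a (m - 1)) (a.getD m 0) := by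
  cases m with
  | zero => omega
  | succ i => simp [mTo]

lemma sTo_succ (a : List Int) (k : Nat) (hk : 1 ≤ k) :
    sTo a k = min (sTo a (k - 1)) (a.getD (a.length - 1 - k) 0) := by
  cases k with
  | zero => omega
  | succ i =>
    have : a.length - 1 - (i + 1) = a.length - 2 - i := by omega
    simp [sTo, this]

lemma loop1 (a : List Int) (m : Nat) (hm1 : 1 ≤ m) (hm2 : m ≤ a.length - 1) :
    HeapGood ((PySem.List.pyRange 1 (m : Int) 1).foldl (stepL a)
        (heappush [] (PySem.List.pyGetD a 0 0), List.replicate (a.length + 1) 0)).1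
      (mTo a (m - 1)) ∧
    ((PySem.List.pyRange 1 (m : Int) 1).foldl (stepL a)
        (heappush [] (PySem.List.pyGetD a 0 0), List.replicate (a.length + 1) 0)).2.length
      = a.length + 1 ∧
    ∀ j : Nat,
      ((PySem.List.pyRange 1 (m : Int) 1).foldl (stepL a)
          (heappush [] (PySem.List.pyGetD a 0 0), List.replicate (a.length + 1) 0)).2.getD j 0
        = if 1 ≤ j ∧ j < m ∧ a.getD j 0 < mTo a (j - 1) then 1 else 0 := by
  induction m, hm1 using Nat.le_induction with
  | base =>
    rw [show ((1 : Nat) : Int) = 1 by norm_num, PySem.List.pyRange_one_eq_nil (by omega)]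
    simp only [List.foldl_nil]
    refine ⟨?_, by simp, ?_⟩
    · rw [PySem.List.pyGetD_zero, heappush_nil]
      exact heapGood_singleton _
    · intro j
      rw [getD_replicate]
      split_ifs with hc
      · omega
      · rfl
  | succ m hm ih =>
    obtain ⟨ih1, ih2, ih3⟩ := ih (by omega)
    rw [show (((m + 1 : Nat)) : Int) = (m : Int) + 1 by push_cast; ring,
        PySem.List.pyRange_one_succ_right (by exact_mod_cast hm),
        List.foldl_append]
    set s := (PySem.List.pyRange 1 (m : Int) 1).foldl (stepL a)
        (heappush [] (PySem.List.pyGetD a 0 0), List.replicate (a.length + 1) 0) with hs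
    simp only [List.foldl_cons, List.foldl_nil]
    obtain ⟨hne, hhead, hlb⟩ := ih1
    have hstep1 : (stepL a s (m : Int)).1 = heappush s.1 (a.getD m 0) := by
      simp [stepL]
    have hstep2 : (stepL a s (m : Int)).2 =
        if a.getD m 0 < mTo a (m - 1) then s.2.set m (s.2.getD m 0 + 1) else s.2 := by
      simp only [stepL, PySem.List.pyGetD_zero, PySem.List.pyGetD_natCast,
        PySem.List.pySetD_natCast, hhead, gt_iff_lt]
    refine ⟨?_, ?_, ?_⟩
    · rw [hstep1]
      have := heappush_good s.1 (mTo a (m - 1)) (a.getD m 0) ⟨hne, hhead, hlb⟩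
      rw [← mTo_succ a m hm] at this
      simpa using this
    · rw [hstep2]
      split_ifs <;> simp [ih2]
    · intro j
      rw [hstep2]
      by_cases hc : a.getD m 0 < mTo a (m - 1)
      · rw [if_pos hc, getD_set_eq, ih2]
        by_cases hj : j = m
        · subst hj
          rw [if_pos ⟨rfl, by omega⟩, ih3, if_neg (by rintro ⟨_, h2, _⟩; omega),
              if_pos ⟨hm, by omega, hc⟩]
          norm_num
        · rw [if_neg (by tauto), ih3]
          by_cases hcj : 1 ≤ j ∧ j < m ∧ a.getD j 0 < mTo a (j - 1)
          · rw [if_pos hcj, if_pos ⟨hcj.1, by omega, hcj.2.2⟩]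
          · rw [if_neg hcj, if_neg (by rintro ⟨h1, h2, h3⟩; exact hcj ⟨h1, by omega, h3⟩)]
      · rw [if_neg hc, ih3 j]
        by_cases hcj : 1 ≤ j ∧ j < m ∧ a.getD j 0 < mTo a (j - 1)
        · rw [if_pos hcj, if_pos ⟨hcj.1, by omega, hcj.2.2⟩]
        · rw [if_neg hcj, if_neg ?_]
          rintro ⟨h1, h2, h3⟩
          rcases Nat.lt_succ_iff_lt_or_eq.mp h2 with h4 | h4
          · exact hcj ⟨h1, h4, h3⟩
          · subst h4; exact hc h3

lemma loop2 (a bc : List Int)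
    (hbc : ∀ j : Nat, 1 ≤ j → j ≤ a.length - 2 →
      bc.getD j 0 = if a.getD j 0 < mTo a (j - 1) then 1 else 0) :
    ∀ k : Nat, k ≤ a.length - 1 → ∀ (ans : Int) (rh : List Int),
      HeapGood rh (sTo a (a.length - 1 - k)) →
      ((PySem.List.pyRange ((k : Int) - 1) 0 (-1)).foldl (stepR a bc) (ans, rh)).1
        = ans + cntTo a (k - 1) := by
  intro k
  induction k with
  | zero =>
    intro _ ans rh _
    rw [show ((0 : Nat) : Int) - 1 = -1 by norm_num,
        PySem.List.pyRange_neg_one_eq_nil (by norm_num)]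
    simp [cntTo]
  | succ k ih =>
    intro hk ans rh hg
    rcases Nat.eq_zero_or_pos k with hk0 | hk1
    · subst hk0
      rw [show ((1 : Nat) : Int) - 1 = 0 by norm_num,
          PySem.List.pyRange_neg_one_eq_nil (by norm_num)]
      simp [cntTo]
    · rw [show (((k + 1 : Nat)) : Int) - 1 = (k : Int) by push_cast; ring,
          PySem.List.pyRange_neg_one_cons (by exact_mod_cast hk1), List.foldl_cons]
      have hkn : k ≤ a.length - 2 := by omega
      have hgood : HeapGood rh (sTo a (a.length - 2 - k)) := by
        have : a.length - 1 - (k + 1) = a.length - 2 - k := by omega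
        rwa [this] at hg
      obtain ⟨hne, hhead, hlb⟩ := hgood
      have hstep : stepR a bc (ans, rh) (k : Int) =
          (if a.getD k 0 < mTo a (k - 1) then ans + 1
           else if a.getD k 0 < sTo a (a.length - 2 - k) then ans + 1 else ans,
           heappush rh (a.getD k 0)) := by
        simp only [stepR, PySem.List.pyGetD_zero, PySem.List.pyGetD_natCast, hhead, gt_iff_lt]
        rw [hbc k hk1 hkn]
        split_ifs <;> simp_all
      rw [hstep]
      have hg' : HeapGood (heappush rh (a.getD k 0)) (sTo a (a.length - 1 - k)) := by
        have := heappush_good rh (sTo a (a.length - 2 - k)) (a.getD k 0) ⟨hne, hhead, hlb⟩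
        rw [show sTo a (a.length - 1 - k)
              = min (sTo a (a.length - 1 - k - 1)) (a.getD (a.length - 1 - (a.length - 1 - k)) 0)
            from sTo_succ a (a.length - 1 - k) (by omega),
          show a.length - 1 - k - 1 = a.length - 2 - k by omega,
          show a.length - 1 - (a.length - 1 - k) = k by omega]
        exact this
      rw [ih (by omega) _ _ hg']
      have he : (if a.getD k 0 < mTo a (k - 1) then ans + 1
           else if a.getD k 0 < sTo a (a.length - 2 - k) then ans + 1 else ans)
          = ans + incr a k := by
        rw [incr]
        split_ifs <;> first | tauto | ring
      rw [he, show k + 1 - 1 = (k - 1) + 1 by omega, cntTo, show k - 1 + 1 = k by omega]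
      ring

lemma sol_eq (a : List Int) (ha : a ≠ []) :
    solution a = 2 + cntTo a (a.length - 2) := by
  have hn : 1 ≤ a.length := List.length_pos_iff.mpr ha
  simp only [solution]
  rw [show ((a.length : Int) - 1) = ((a.length - 1 : Nat) : Int) by omega,
      show ((a.length : Int) - 2) = ((a.length - 1 : Nat) : Int) - 1 by omega]
  have hbc : ∀ j : Nat, 1 ≤ j → j ≤ a.length - 2 →
      ((PySem.List.pyRange 1 ((a.length - 1 : Nat) : Int) 1).foldl (stepL a)
        (heappush [] (PySem.List.pyGetD a 0 0), List.replicate (a.length + 1) 0)).2.getD j 0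
      = if a.getD j 0 < mTo a (j - 1) then 1 else 0 := by
    by_cases hn2 : 2 ≤ a.length
    · obtain ⟨h1, h2, h3⟩ := loop1 a (a.length - 1) (by omega) (le_refl _)
      intro j hj1 hj2
      rw [h3 j]
      by_cases hc : a.getD j 0 < mTo a (j - 1)
      · rw [if_pos ⟨hj1, by omega, hc⟩, if_pos hc]
      · rw [if_neg (by tauto), if_neg hc]
    · intro j hj1 hj2
      omega
  have hgt : HeapGood (heappush [] (PySem.List.pyGetD a (-1) 0))
      (sTo a (a.length - 1 - (a.length - 1))) := by
    rw [PySem.List.pyGetD_neg_ofNat a 1 0 (by omega) (by omega), heappush_nil,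
        show a.length - 1 - (a.length - 1) = 0 by omega]
    have hv : sTo a 0 = a[a.length - 1] := by
      rw [show sTo a 0 = a.getD (a.length - 1) 0 from rfl]
      simp [List.getD_eq_getElem?_getD, List.getElem?_eq_getElem (show a.length - 1 < a.length by omega)]
    rw [hv]
    exact heapGood_singleton _
  rw [loop2 a _ hbc (a.length - 1) (le_refl _) 2 _ hgt,
      show a.length - 1 - 1 = a.length - 2 by omega]

lemma loopP (a : List Int) (m : Nat) (hm1 : 1 ≤ m) (hm2 : m ≤ a.length) :
    ((PySem.List.pyRange 1 (m : Int) 1).foldl (stepP a)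
        (List.replicate a.length 0, PySem.List.pyGetD a 0 0)).2 = mTo a (m - 1) ∧
    ((PySem.List.pyRange 1 (m : Int) 1).foldl (stepP a)
        (List.replicate a.length 0, PySem.List.pyGetD a 0 0)).1.length = a.length ∧
    ∀ t : Nat, 1 ≤ t → t < m →
      ((PySem.List.pyRange 1 (m : Int) 1).foldl (stepP a)
          (List.replicate a.length 0, PySem.List.pyGetD a 0 0)).1.getD t 0 = mTo a (t - 1) := by
  induction m, hm1 using Nat.le_induction with
  | base =>
    rw [show ((1 : Nat) : Int) = 1 by norm_num, PySem.List.pyRange_one_eq_nil (by omega)]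
    refine ⟨by simp [PySem.List.pyGetD_zero, mTo], by simp, ?_⟩
    intro t ht1 ht2
    omega
  | succ m hm ih =>
    obtain ⟨ih1, ih2, ih3⟩ := ih (by omega)
    rw [show (((m + 1 : Nat)) : Int) = (m : Int) + 1 by push_cast; ring,
        PySem.List.pyRange_one_succ_right (by exact_mod_cast hm), List.foldl_append]
    set s := (PySem.List.pyRange 1 (m : Int) 1).foldl (stepP a)
        (List.replicate a.length 0, PySem.List.pyGetD a 0 0) with hs
    simp only [List.foldl_cons, List.foldl_nil]
    have hstep1 : (stepP a s (m : Int)).1 = s.1.set m s.2 := by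
      simp [stepP]
    have hstep2 : (stepP a s (m : Int)).2 = min s.2 (a.getD m 0) := by
      simp only [stepP, PySem.List.pyGetD_natCast]
      rw [if_lt_min]
    refine ⟨?_, ?_, ?_⟩
    · rw [hstep2, ih1, ← mTo_succ a m hm]
      simp
    · rw [hstep1]
      simp [ih2]
    · intro t ht1 ht2
      rw [hstep1, getD_set_eq, ih2]
      by_cases htm : t = m
      · subst htm
        rw [if_pos ⟨rfl, by omega⟩, ih1]
      · rw [if_neg (by tauto), ih3 t ht1 (by omega)]

lemma loopS (a : List Int) (hn2 : 2 ≤ a.length) :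
    ∀ k : Nat, k ≤ a.length - 1 → ∀ (sm : List Int) (c : Int),
      sm.length = a.length → c = sTo a (a.length - 1 - k) →
      (∀ t : Nat, k ≤ t → t ≤ a.length - 2 → sm.getD t 0 = sTo a (a.length - 2 - t)) →
      ((PySem.List.pyRange ((k : Int) - 1) (-1) (-1)).foldl (stepP a) (sm, c)).1.length = a.length ∧
      ∀ t : Nat, t ≤ a.length - 2 →
        ((PySem.List.pyRange ((k : Int) - 1) (-1) (-1)).foldl (stepP a) (sm, c)).1.getD t 0
          = sTo a (a.length - 2 - t) := by
  intro k
  induction k with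
  | zero =>
    intro _ sm c hlen hc hsm
    rw [show ((0 : Nat) : Int) - 1 = -1 by norm_num,
        PySem.List.pyRange_neg_one_eq_nil (by norm_num)]
    exact ⟨hlen, fun t ht => hsm t (by omega) ht⟩
  | succ k ih =>
    intro hk sm c hlen hc hsm
    rw [show (((k + 1 : Nat)) : Int) - 1 = (k : Int) by push_cast; ring,
        PySem.List.pyRange_neg_one_cons (by omega),
        List.foldl_cons]
    have hstep : stepP a (sm, c) (k : Int) = (sm.set k c, min c (a.getD k 0)) := by
      simp only [stepP, PySem.List.pyGetD_natCast, PySem.List.pySetD_natCast]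
      rw [if_lt_min]
    rw [hstep]
    apply ih (by omega)
    · simp [hlen]
    · rw [hc, show a.length - 1 - (k + 1) = a.length - 2 - k by omega]
      rw [show sTo a (a.length - 1 - k)
            = min (sTo a (a.length - 1 - k - 1)) (a.getD (a.length - 1 - (a.length - 1 - k)) 0)
          from sTo_succ a (a.length - 1 - k) (by omega),
        show a.length - 1 - k - 1 = a.length - 2 - k by omega,
        show a.length - 1 - (a.length - 1 - k) = k by omega]
    · intro t ht1 ht2
      rw [getD_set_eq, hlen]
      by_cases htk : t = k
      · subst htk
        rw [if_pos ⟨rfl, by omega⟩, hc,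
            show a.length - 1 - (t + 1) = a.length - 2 - t by omega]
      · rw [if_neg (by tauto)]
        exact hsm t (by omega) ht2

lemma loopC (a pm sm : List Int)
    (hpm : ∀ t : Nat, 1 ≤ t → t ≤ a.length - 2 → pm.getD t 0 = mTo a (t - 1))
    (hsm : ∀ t : Nat, t ≤ a.length - 2 → sm.getD t 0 = sTo a (a.length - 2 - t)) :
    ∀ m : Nat, 1 ≤ m → m ≤ a.length - 1 →
      (PySem.List.pyRange 1 (m : Int) 1).foldl (stepC a pm sm) 2 = 2 + cntTo a (m - 1) := by
  intro m hm1
  induction m, hm1 using Nat.le_induction with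
  | base =>
    intro _
    rw [show ((1 : Nat) : Int) = 1 by norm_num, PySem.List.pyRange_one_eq_nil (by omega)]
    simp [cntTo]
  | succ m hm ih =>
    intro hm2
    rw [show (((m + 1 : Nat)) : Int) = (m : Int) + 1 by push_cast; ring,
        PySem.List.pyRange_one_succ_right (by exact_mod_cast hm), List.foldl_append,
        List.foldl_cons, List.foldl_nil, ih (by omega)]
    have hmn : m ≤ a.length - 2 := by omega
    have hstep : stepC a pm sm (2 + cntTo a (m - 1)) (m : Int)
        = 2 + cntTo a (m - 1) + incr a m := by
      simp only [stepC, PySem.List.pyGetD_natCast]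
      rw [hpm m hm hmn, hsm m hmn, incr]
      split_ifs <;> first | tauto | ring
    rw [hstep, show m + 1 - 1 = (m - 1) + 1 by omega, cntTo, show m - 1 + 1 = m by omega]
    ring

lemma alt_eq (a : List Int) (ha : a ≠ []) :
    solution_alt a = 2 + cntTo a (a.length - 2) := by
  have hn : 1 ≤ a.length := List.length_pos_iff.mpr ha
  by_cases hn2 : 2 ≤ a.length
  · simp only [solution_alt]
    rw [show ((a.length : Int) - 1) = ((a.length - 1 : Nat) : Int) by omega,
        show ((a.length : Int) - 2) = ((a.length - 1 : Nat) : Int) - 1 by omega]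
    obtain ⟨hp1, hp2, hp3⟩ := loopP a a.length hn (le_refl _)
    have hq := loopS a hn2 (a.length - 1) (le_refl _) (List.replicate a.length 0)
        (PySem.List.pyGetD a ((a.length - 1 : Nat) : Int) 0) (by simp) ?_ ?_
    · obtain ⟨hq1, hq2⟩ := hq
      rw [loopC a _ _ ?_ hq2 (a.length - 1) (by omega) (le_refl _)]
      · rw [show a.length - 1 - 1 = a.length - 2 by omega]
      · intro t ht1 ht2
        exact hp3 t ht1 (by omega)
    · rw [PySem.List.pyGetD_natCast,
          show a.length - 1 - (a.length - 1) = 0 by omega]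
      rfl
    · intro t ht1 ht2
      omega
  · have h1 : a.length = 1 := by omega
    obtain ⟨x, hx⟩ : ∃ x, a = [x] := by
      cases a with
      | nil => exact absurd rfl ha
      | cons y t =>
        cases t with
        | nil => exact ⟨y, rfl⟩
        | cons z u => simp at h1
    subst hx
    have e1 : solution_alt [x] = 2 := by
      simp only [solution_alt]
      norm_num [PySem.List.pyRange_one_eq_nil, PySem.List.pyRange_neg_one_eq_nil]
    rw [e1]
    simp [cntTo]

theorem solution_spec : Claim_equal_solution := by
  intro a _ hpre
  unfold Spec_solution
  rw [sol_eq a hpre, alt_eq a hpre]
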